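-- pv_equiv track=rewrite | github.com/Laureano4656/Facultad-2025 | 2do-Cuatrimestre/Teoria-de-la-Informacion/utilP1.py | univoco
-- ===== SOURCE A (Python) =====
-- def univoco(codigo): # Un codigo es univocamente decodificable si cualquier secuencia de simbolos del alfabeto puede ser decodificada de una unica manera
--   S = [set(codigo), set()] # Lista de conjuntos ya vistos
--   i = 0 # Numero de Iteraciones
--   seguir = True
--   while seguir:
--       for x in S[0]: # Siempre comparo con el codigo
--           for y in S[i]: # En S[i] se guarda el conjunto el cual debo comparar con S[0]
--               if x.startswith(y) and x != y:
--                   S[i+1].add(x[len(y):])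
--               else:
--                   if y.startswith(x) and x != y:
--                       S[i+1].add(y[len(x):])
--       if S[0].intersection(S[i+1]) != set(): # Si la intersección no es vacía, no es unívocamente decodificable
--           respuesta = False
--           seguir = False
--       else:
--           if S[i+1] == set() or S[i+1] in S[0:i+1]: # Si en la pasada me quedo un conjunto vacio o el conjunto que me quedo ya lo vi antes entonces es un codigo univocamente decodificable
--               respuesta = True
--               seguir = False
--           else:
--               S.append(set()) # Si no encontre nada sigo buscando
--               i += 1
--   return respuesta
-- ===== SOURCE B (Python) =====
-- def univoco(codigo):
--     # Sardinas-Patterson via a worklist of individual dangling suffixes: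
--     # each distinct suffix is processed once instead of recomputing whole rounds.
--     C = list(dict.fromkeys(codigo))
--     Cset = set(C)
--     pending = []
--     for w in C:
--         for u in C:
--             if u != w and w.startswith(u):
--                 pending.append(w[len(u):])
--     seen = set()
--     while pending:
--         s = pending.pop()
--         if s in seen:
--             continue
--         if s in Cset:
--             return False
--         seen.add(s)
--         for w in C:
--             if w != s and w.startswith(s):
--                 pending.append(w[len(s):])
--             if s != w and s.startswith(w):
--                 pending.append(s[len(w):])
--     return True
-- ===== Notes on version B (the rewrite author's own statement) =====
-- stated objective: faster
-- what changed: Replaces A's round-by-round recomputation of whole residual sets (with a history of seen sets compared set-by-set) by a worklist BFS over individual dangling suffixes with a visited set, so each distinct suffix is paired with the code exactly once.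
import Mathlib
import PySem

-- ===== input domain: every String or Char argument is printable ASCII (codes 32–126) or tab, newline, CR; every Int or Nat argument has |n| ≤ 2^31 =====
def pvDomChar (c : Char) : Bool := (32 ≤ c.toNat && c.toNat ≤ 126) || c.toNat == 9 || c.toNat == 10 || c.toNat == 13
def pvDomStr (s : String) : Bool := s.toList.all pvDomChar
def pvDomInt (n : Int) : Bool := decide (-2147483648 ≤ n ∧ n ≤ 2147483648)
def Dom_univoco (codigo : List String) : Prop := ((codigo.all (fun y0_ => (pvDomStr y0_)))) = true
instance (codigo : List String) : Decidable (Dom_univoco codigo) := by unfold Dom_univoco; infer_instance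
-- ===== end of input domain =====

-- B replaces A's round-by-round recomputation of whole residual sets (with a history of
-- previously seen sets) by a worklist over individual dangling suffixes with a visited set,
-- so each distinct dangling suffix is paired against the code once (objective: faster).

-- ===== PORT A =====
-- upper bound on loop iterations, used only as a totality guard (fuel) for the while-loops
def pvSumLen (codigo : List String) : Nat := (codigo.map (fun w => w.toList.length + 1)).sum

-- body of A's inner 'for y in S[i]' (the if/elif over one pair x, y)
def rndInner (x : String) (acc : PySem.Set String) (y : String) : PySem.Set String :=
  if PySem.Str.startswith x y && x != y then
    PySem.Set.add acc (PySem.Str.slice x (some (PySem.Str.len y)) none)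
  else if PySem.Str.startswith y x && x != y then
    PySem.Set.add acc (PySem.Str.slice y (some (PySem.Str.len x)) none)
  else acc

-- one pass of A's while-body building S[i+1] from S[0] and S[i]
def rndA (S0 Si : PySem.Set String) : PySem.Set String :=
  S0.foldl (fun acc x => Si.foldl (rndInner x) acc) PySem.Set.empty

-- A's while loop: hist is S[0:i+1], Si is S[i]
def loopA (S0 : PySem.Set String) : Nat → List (PySem.Set String) → PySem.Set String → Bool
  | 0, _, _ => true
  | Nat.succ fuel, hist, Si =>
    let Sn := rndA S0 Si
    if PySem.Set.equal (PySem.Set.inter S0 Sn) PySem.Set.empty = false then false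
    else if PySem.Set.equal Sn PySem.Set.empty || hist.any (fun t => PySem.Set.equal Sn t) then true
    else loopA S0 fuel (hist ++ [Sn]) Sn

def univoco (codigo : List String) : Bool :=
  let S0 : PySem.Set String := PySem.Set.ofList codigo
  loopA S0 (2 ^ pvSumLen codigo + 2) [S0] S0

-- ===== PORT B =====
-- pushes from one codeword w against the popped suffix s (the two ifs of Source B's inner loop)
def pushOne (s : String) (p : List String) (w : String) : List String :=
  let p1 := if w != s && PySem.Str.startswith w s then
              p ++ [PySem.Str.slice w (some (PySem.Str.len s)) none] else p
  if s != w && PySem.Str.startswith s w then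
    p1 ++ [PySem.Str.slice s (some (PySem.Str.len w)) none] else p1

def pushes (C : List String) (s : String) (p : List String) : List String :=
  C.foldl (pushOne s) p

-- Source B's initial pending list (residuals among pairs of distinct codewords)
def initPend (C : List String) : List String :=
  C.foldl (fun p w => C.foldl (fun p u =>
    if u != w && PySem.Str.startswith w u then
      p ++ [PySem.Str.slice w (some (PySem.Str.len u)) none] else p) p) []

-- Source B's while loop: pop from the end of pending, skip seen, fail on a codeword, else push
def loopB (C : PySem.Set String) : Nat → List String → PySem.Set String → Bool
  | 0, _, _ => true
  | Nat.succ fuel, pending, seen =>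
    match pending.getLast? with
    | none => true
    | some s =>
      let rest := pending.dropLast
      if PySem.Set.contains seen s then loopB C fuel rest seen
      else if PySem.Set.contains C s then false
      else loopB C fuel (pushes C s rest) (PySem.Set.add seen s)

def univoco_alt (codigo : List String) : Bool :=
  let C : PySem.Set String := PySem.List.dedup codigo
  loopB C ((initPend C).length + (pvSumLen codigo + 1) * (2 * C.length + 1) + 1)
    (initPend C) PySem.Set.empty

-- ===== PRECONDITION & SPEC =====
def Spec_univoco (codigo : List String) (out : Bool) : Prop := out = univoco_alt codigo
instance (codigo : List String) (out : Bool) : Decidable (Spec_univoco codigo out) := by unfold Spec_univoco; infer_instance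

-- ===== CLAIM (what is proved, stated in full; the proofs are below) =====
def Claim_equal_univoco : Prop := ∀ (codigo : List String), Dom_univoco codigo → Spec_univoco codigo (univoco codigo)

-- ===== LEMMAS AND PROOFS =====

-- abstract layer: residuals, the Sardinas–Patterson step on finite sets of suffixes
def swB (x y : String) : Bool := PySem.Str.startswith x y
def rsd (x y : String) : String := PySem.Str.slice x (some (PySem.Str.len y)) none

-- contribution of the ordered pair (x, y) in A's if/elif
def pairRes (x y : String) : Finset String :=
  if swB x y = true ∧ x ≠ y then {rsd x y}
  else if swB y x = true ∧ x ≠ y then {rsd y x} else ∅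

def stepF (Cf T : Finset String) : Finset String :=
  Cf.biUnion (fun x => T.biUnion (fun y => pairRes x y))

def chainR (Cf : Finset String) : Nat → Finset String
  | 0 => stepF Cf Cf
  | n + 1 => chainR Cf n ∪ stepF Cf (chainR Cf n)

def sufF (w : String) : Finset String :=
  ((List.range (w.toList.length + 1)).map
    (fun (k : Nat) => PySem.Str.slice w (some (k : Int)) none)).toFinset

def UF (Cf : Finset String) : Finset String := Cf.biUnion sufF

def RN (Cf : Finset String) : Finset String := chainR Cf ((UF Cf).card + 1)

-- ---- string facts ----
lemma rsd_toList (x y : String) : (rsd x y).toList = x.toList.drop y.toList.length := by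
  rw [rsd, PySem.Str.toList_slice, PySem.Chars.slice_eq_listSlice, PySem.Str.len_eq,
    PySem.List.slice_from_natCast]

lemma slice_toList (w : String) (k : Nat) :
    (PySem.Str.slice w (some (k : Int)) none).toList = w.toList.drop k := by
  rw [PySem.Str.toList_slice, PySem.Chars.slice_eq_listSlice, PySem.List.slice_from_natCast]

lemma rsd_suffix (x y : String) : (rsd x y).toList <:+ x.toList := by
  rw [rsd_toList]; exact List.drop_suffix _ _

lemma mem_sufF (s w : String) : s ∈ sufF w ↔ s.toList <:+ w.toList := by
  rw [sufF, List.mem_toFinset, List.mem_map]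
  constructor
  · rintro ⟨k, hk, rfl⟩; rw [slice_toList]; exact List.drop_suffix _ _
  · rintro ⟨t, ht⟩
    refine ⟨t.length, ?_, ?_⟩
    · rw [List.mem_range]; have := congrArg List.length ht; rw [List.length_append] at this; omega
    · apply String.toList_inj.mp
      rw [slice_toList, ← ht]; simp

lemma swB_antisymm {x y : String} (h1 : swB x y = true) (h2 : swB y x = true) : x = y := by
  rw [swB, PySem.Str.startswith_eq, PySem.Chars.startswith_iff] at h1 h2
  exact (String.toList_inj.mp (h1.sublist.antisymm h2.sublist)).symm

lemma card_sufF_le (w : String) : (sufF w).card ≤ w.toList.length + 1 := by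
  calc (sufF w).card ≤ _ := List.toFinset_card_le _
  _ ≤ _ := by simp

-- ---- stepF facts ----
lemma mem_stepF {Cf T : Finset String} {z : String} :
    z ∈ stepF Cf T ↔ ∃ x ∈ Cf, ∃ y ∈ T, z ∈ pairRes x y := by
  simp [stepF, Finset.mem_biUnion]

lemma mem_stepF_single {Cf T : Finset String} {z : String} :
    z ∈ stepF Cf T ↔ ∃ y ∈ T, z ∈ stepF Cf {y} := by
  simp [mem_stepF]; tauto

lemma stepF_mono {Cf T T' : Finset String} (h : T ⊆ T') : stepF Cf T ⊆ stepF Cf T' := by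
  intro z hz; rw [mem_stepF] at *; obtain ⟨x, hx, y, hy, hp⟩ := hz; exact ⟨x, hx, y, h hy, hp⟩

lemma mem_UF_self {Cf : Finset String} {w : String} (h : w ∈ Cf) : w ∈ UF Cf :=
  Finset.mem_biUnion.mpr ⟨w, h, (mem_sufF w w).mpr (List.suffix_refl _)⟩

lemma pairRes_subset_UF {Cf : Finset String} {x y : String} (hx : x ∈ Cf) (hy : y ∈ UF Cf) :
    pairRes x y ⊆ UF Cf := by
  intro z hz
  rw [pairRes] at hz
  split_ifs at hz with h1 h2
  · rw [Finset.mem_singleton] at hz; subst hz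
    exact Finset.mem_biUnion.mpr ⟨x, hx, (mem_sufF _ _).mpr (rsd_suffix x y)⟩
  · rw [Finset.mem_singleton] at hz; subst hz
    obtain ⟨w, hw, hyw⟩ := Finset.mem_biUnion.mp hy
    exact Finset.mem_biUnion.mpr
      ⟨w, hw, (mem_sufF _ _).mpr ((rsd_suffix y x).trans ((mem_sufF _ _).mp hyw))⟩
  · exact absurd hz (Finset.notMem_empty _)

lemma stepF_subset_UF {Cf T : Finset String} (hT : T ⊆ UF Cf) : stepF Cf T ⊆ UF Cf := by
  intro z hz; rw [mem_stepF] at hz; obtain ⟨x, hx, y, hy, hp⟩ := hz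
  exact pairRes_subset_UF hx (hT hy) hp

-- ---- chain facts ----
lemma chainR_subset_UF (Cf : Finset String) : ∀ n, chainR Cf n ⊆ UF Cf := by
  intro n; induction n with
  | zero => exact stepF_subset_UF (fun w hw => mem_UF_self hw)
  | succ n ih => exact Finset.union_subset ih (stepF_subset_UF ih)

lemma chainR_le_mono (Cf : Finset String) {m n : Nat} (h : m ≤ n) : chainR Cf m ⊆ chainR Cf n := by
  induction n with
  | zero => simp_all
  | succ n ih =>
    rcases Nat.lt_or_ge m (n+1) with h' | h'
    · exact (ih (by omega)).trans Finset.subset_union_left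
    · have : m = n + 1 := by omega
      subst this; exact Finset.Subset.refl _

lemma chainR_stab (Cf : Finset String) {n : Nat} (h : chainR Cf (n+1) = chainR Cf n) :
    ∀ m, chainR Cf (n + m) = chainR Cf n := by
  intro m; induction m with
  | zero => rfl
  | succ m ih => rw [show n + (m+1) = (n+m)+1 from rfl, chainR, ih]; exact h

lemma RN_closed (Cf : Finset String) : stepF Cf (RN Cf) ⊆ RN Cf := by
  have hstrict : ∀ n : Nat, (∀ k < n, chainR Cf (k+1) ≠ chainR Cf k) → n ≤ (chainR Cf n).card := by
    intro n
    induction n with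
    | zero => simp
    | succ n ih =>
      intro h
      have h1 : n ≤ (chainR Cf n).card := ih (fun k hk => h k (by omega))
      have h2 : chainR Cf n ⊂ chainR Cf (n+1) :=
        lt_of_le_of_ne (chainR_le_mono Cf (by omega)) (Ne.symm (h n (by omega)))
      have := Finset.card_lt_card h2
      omega
  by_cases hall : ∀ k < (UF Cf).card + 1, chainR Cf (k+1) ≠ chainR Cf k
  · exfalso
    have h1 := hstrict ((UF Cf).card + 1) hall
    have h2 := Finset.card_le_card (chainR_subset_UF Cf ((UF Cf).card + 1))
    omega
  · push Not at hall
    obtain ⟨k, hk, heq⟩ := hall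
    have hstab := chainR_stab Cf heq
    have h1 : chainR Cf ((UF Cf).card + 1) = chainR Cf k := by
      have h2 := hstab ((UF Cf).card + 1 - k)
      rwa [Nat.add_sub_cancel' (by omega : k ≤ (UF Cf).card + 1)] at h2
    rw [RN, h1]
    intro z hz
    have : z ∈ chainR Cf (k+1) := Finset.mem_union_right _ hz
    rwa [heq] at this

lemma chainR_subset_closed {Cf E : Finset String} (hE : stepF Cf E ⊆ E)
    (h0 : chainR Cf 0 ⊆ E) : ∀ n, chainR Cf n ⊆ E := by
  intro n; induction n with
  | zero => exact h0
  | succ n ih => exact Finset.union_subset ih ((stepF_mono ih).trans hE)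

lemma RN_subset_UF (Cf : Finset String) : RN Cf ⊆ UF Cf := chainR_subset_UF Cf _

lemma chainR_zero_subset_RN (Cf : Finset String) : chainR Cf 0 ⊆ RN Cf :=
  chainR_le_mono Cf (Nat.zero_le _)

-- ---- characterizations of the ports' set builders ----
lemma condA_iff (a b : String) :
    ((PySem.Str.startswith a b && a != b) = true) ↔ (swB a b = true ∧ a ≠ b) := by
  simp [swB]

lemma condB_iff (a b : String) :
    ((a != b && PySem.Str.startswith a b) = true) ↔ (swB a b = true ∧ a ≠ b) := by
  simp [swB]; tauto

lemma condC_iff (x y : String) :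
    ((PySem.Str.startswith y x && x != y) = true) ↔ (swB y x = true ∧ x ≠ y) := by
  simp [swB]

lemma condD_iff (w u : String) :
    ((u != w && PySem.Str.startswith w u) = true) ↔ (swB w u = true ∧ u ≠ w) := by
  simp [swB]; tauto

lemma mem_rndInner {x y z : String} {acc : PySem.Set String} :
    z ∈ rndInner x acc y ↔ z ∈ acc ∨ z ∈ pairRes x y := by
  rw [rndInner, pairRes]
  by_cases h1 : swB x y = true ∧ x ≠ y
  · rw [if_pos ((condA_iff x y).mpr h1), if_pos h1]
    simp [PySem.Set.mem_add, rsd]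
  · rw [if_neg (fun hb => h1 ((condA_iff x y).mp hb)), if_neg h1]
    by_cases h2 : swB y x = true ∧ x ≠ y
    · rw [if_pos ((condC_iff x y).mpr h2), if_pos h2]
      simp [PySem.Set.mem_add, rsd]
    · rw [if_neg (fun hb => h2 ((condC_iff x y).mp hb)), if_neg h2]
      simp

lemma mem_foldl_rndInner {x : String} (l : List String) (acc : PySem.Set String) (z : String) :
    z ∈ l.foldl (rndInner x) acc ↔ z ∈ acc ∨ ∃ y ∈ l, z ∈ pairRes x y := by
  induction l generalizing acc with
  | nil => simp
  | cons y ys ih => simp [ih, mem_rndInner]; tauto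

lemma mem_rndA {S0 Si : PySem.Set String} {z : String} :
    z ∈ rndA S0 Si ↔ ∃ x ∈ S0, ∃ y ∈ Si, z ∈ pairRes x y := by
  have haux : ∀ (l : List String) (acc : PySem.Set String),
      z ∈ l.foldl (fun acc x => Si.foldl (rndInner x) acc) acc ↔
        z ∈ acc ∨ ∃ x ∈ l, ∃ y ∈ Si, z ∈ pairRes x y := by
    intro l
    induction l with
    | nil => intro acc; simp
    | cons x xs ih =>
      intro acc
      rw [List.foldl_cons, ih, mem_foldl_rndInner]
      simp only [List.mem_cons]
      constructor
      · rintro ((h | h) | h)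
        · exact Or.inl h
        · exact Or.inr (by obtain ⟨y, hy, hp⟩ := h; exact ⟨x, Or.inl rfl, y, hy, hp⟩)
        · obtain ⟨x', hx', rest⟩ := h; exact Or.inr ⟨x', Or.inr hx', rest⟩
      · rintro (h | ⟨x', (rfl | hx'), rest⟩)
        · exact Or.inl (Or.inl h)
        · exact Or.inl (Or.inr rest)
        · exact Or.inr ⟨x', hx', rest⟩
  rw [rndA, haux]
  simp [PySem.Set.empty]

lemma rndA_toFinset (S0 Si : PySem.Set String) :
    (rndA S0 Si).toFinset = stepF S0.toFinset Si.toFinset := by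
  ext z; simp [List.mem_toFinset, mem_rndA, mem_stepF]

-- pushes / initPend characterizations
lemma mem_pushOne {s w z : String} {p : List String} :
    z ∈ pushOne s p w ↔ z ∈ p ∨ z ∈ pairRes w s := by
  simp only [pushOne, pairRes]
  by_cases h1 : swB w s = true ∧ w ≠ s
  · have hnB : ¬ (s != w && PySem.Str.startswith s w) = true := fun hb =>
      h1.2 (swB_antisymm h1.1 ((condB_iff s w).mp hb).1)
    rw [if_pos ((condB_iff w s).mpr h1), if_neg hnB, if_pos h1]
    simp [rsd]
  · rw [if_neg (fun hb => h1 ((condB_iff w s).mp hb)), if_neg h1]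
    by_cases h2 : swB s w = true ∧ s ≠ w
    · have hws : w ≠ s := fun he => h2.2 he.symm
      rw [if_pos ((condB_iff s w).mpr h2), if_pos ⟨h2.1, hws⟩]
      simp [rsd]
    · have hn2 : ¬(swB s w = true ∧ w ≠ s) := fun h => h2 ⟨h.1, fun he => h.2 he.symm⟩
      rw [if_neg (fun hb => h2 ((condB_iff s w).mp hb)), if_neg hn2]
      simp

lemma mem_pushes_aux {s z : String} :
    ∀ (C p : List String), z ∈ pushes C s p ↔ z ∈ p ∨ ∃ w ∈ C, z ∈ pairRes w s := by
  intro C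
  induction C with
  | nil => intro p; simp [pushes]
  | cons w ws ih =>
    intro p
    rw [pushes, List.foldl_cons]
    rw [show ws.foldl (pushOne s) (pushOne s p w) = pushes ws s (pushOne s p w) from rfl,
      ih, mem_pushOne]
    simp only [List.mem_cons]
    constructor
    · rintro ((h | h) | ⟨w', hw', hp⟩)
      · exact Or.inl h
      · exact Or.inr ⟨w, Or.inl rfl, h⟩
      · exact Or.inr ⟨w', Or.inr hw', hp⟩
    · rintro (h | ⟨w', (rfl | hw'), hp⟩)
      · exact Or.inl (Or.inl h)
      · exact Or.inl (Or.inr hp)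
      · exact Or.inr ⟨w', hw', hp⟩

lemma mem_pushes {C : List String} {s z : String} {p : List String} :
    z ∈ pushes C s p ↔ z ∈ p ∨ z ∈ stepF C.toFinset {s} := by
  rw [mem_pushes_aux]
  simp only [mem_stepF, Finset.mem_singleton, List.mem_toFinset]
  constructor
  · rintro (h | ⟨w, hw, hp⟩)
    · exact Or.inl h
    · exact Or.inr ⟨w, hw, s, rfl, hp⟩
  · rintro (h | ⟨x, hx, y, rfl, hp⟩)
    · exact Or.inl h
    · exact Or.inr ⟨x, hx, hp⟩

lemma length_pushOne (s w : String) (p : List String) :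
    (pushOne s p w).length ≤ p.length + 2 := by
  simp only [pushOne]
  split_ifs <;> simp

lemma length_pushes (C : List String) (s : String) (p : List String) :
    (pushes C s p).length ≤ p.length + 2 * C.length := by
  induction C generalizing p with
  | nil => simp [pushes]
  | cons w ws ih =>
    rw [pushes, List.foldl_cons,
      show ws.foldl (pushOne s) (pushOne s p w) = pushes ws s (pushOne s p w) from rfl]
    have h1 := ih (pushOne s p w)
    have h2 := length_pushOne s w p
    simp only [List.length_cons]
    omega

lemma mem_initInner {w z : String} :
    ∀ (l p : List String),
    (z ∈ l.foldl (fun p u => if u != w && PySem.Str.startswith w u then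
        p ++ [PySem.Str.slice w (some (PySem.Str.len u)) none] else p) p ↔
      z ∈ p ∨ ∃ u ∈ l, (swB w u = true ∧ u ≠ w) ∧ z = rsd w u) := by
  intro l
  induction l with
  | nil => intro p; simp
  | cons u us ih =>
    intro p
    rw [List.foldl_cons, ih]
    by_cases hc : swB w u = true ∧ u ≠ w
    · rw [if_pos ((condD_iff w u).mpr hc)]
      simp only [List.mem_append, List.mem_cons, List.not_mem_nil, or_false]
      constructor
      · rintro ((h | h) | ⟨u', hu', rest⟩)
        · exact Or.inl h
        · exact Or.inr ⟨u, Or.inl rfl, hc, h⟩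
        · exact Or.inr ⟨u', Or.inr hu', rest⟩
      · rintro (h | ⟨u', (rfl | hu'), rest⟩)
        · exact Or.inl (Or.inl h)
        · exact Or.inl (Or.inr rest.2)
        · exact Or.inr ⟨u', hu', rest⟩
    · rw [if_neg (fun hb => hc ((condD_iff w u).mp hb))]
      simp only [List.mem_cons]
      constructor
      · rintro (h | ⟨u', hu', rest⟩)
        · exact Or.inl h
        · exact Or.inr ⟨u', Or.inr hu', rest⟩
      · rintro (h | ⟨u', (rfl | hu'), rest⟩)
        · exact Or.inl h
        · exact absurd rest.1 hc
        · exact Or.inr ⟨u', hu', rest⟩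

lemma mem_initPend_aux {z : String} (C : List String) :
    z ∈ initPend C ↔ ∃ w ∈ C, ∃ u ∈ C, (swB w u = true ∧ u ≠ w) ∧ z = rsd w u := by
  rw [initPend]
  have haux : ∀ (l p : List String),
      (z ∈ l.foldl (fun p w => C.foldl (fun p u => if u != w && PySem.Str.startswith w u then
          p ++ [PySem.Str.slice w (some (PySem.Str.len u)) none] else p) p) p ↔
        z ∈ p ∨ ∃ w ∈ l, ∃ u ∈ C, (swB w u = true ∧ u ≠ w) ∧ z = rsd w u) := by
    intro l
    induction l with
    | nil => intro p; simp
    | cons w ws ih =>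
      intro p
      rw [List.foldl_cons, ih, mem_initInner]
      simp only [List.mem_cons]
      constructor
      · rintro ((h | h) | ⟨w', hw', rest⟩)
        · exact Or.inl h
        · exact Or.inr ⟨w, Or.inl rfl, h⟩
        · exact Or.inr ⟨w', Or.inr hw', rest⟩
      · rintro (h | ⟨w', (rfl | hw'), rest⟩)
        · exact Or.inl (Or.inl h)
        · exact Or.inl (Or.inr rest)
        · exact Or.inr ⟨w', hw', rest⟩
  rw [haux]
  simp

lemma mem_initPend {C : List String} {z : String} :
    z ∈ initPend C ↔ z ∈ stepF C.toFinset C.toFinset := by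
  rw [mem_initPend_aux, mem_stepF]
  constructor
  · rintro ⟨w, hw, u, hu, ⟨hsw, hne⟩, rfl⟩
    refine ⟨w, List.mem_toFinset.mpr hw, u, List.mem_toFinset.mpr hu, ?_⟩
    rw [pairRes, if_pos ⟨hsw, fun he => hne he.symm⟩]
    simp
  · rintro ⟨x, hx, y, hy, hp⟩
    rw [pairRes] at hp
    split_ifs at hp with h1 h2
    · rw [Finset.mem_singleton] at hp
      exact ⟨x, List.mem_toFinset.mp hx, y, List.mem_toFinset.mp hy,
        ⟨h1.1, fun he => h1.2 he.symm⟩, hp⟩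
    · rw [Finset.mem_singleton] at hp
      exact ⟨y, List.mem_toFinset.mp hy, x, List.mem_toFinset.mp hx, ⟨h2.1, h2.2⟩, hp⟩
    · exact absurd hp (Finset.notMem_empty _)

-- ---- generic finite-set helpers ----
lemma mem_foldr_union {L : List (Finset String)} {init : Finset String} {z : String} :
    z ∈ L.foldr (· ∪ ·) init ↔ z ∈ init ∨ ∃ A ∈ L, z ∈ A := by
  induction L with
  | nil => simp
  | cons A L ih => simp [ih]; tauto

lemma nodup_length_le_pow {L : List (Finset String)} {U : Finset String}
    (hnd : L.Nodup) (hsub : ∀ A ∈ L, A ⊆ U) : L.length ≤ 2 ^ U.card := by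
  have h1 : L.toFinset ⊆ U.powerset :=
    fun A hA => Finset.mem_powerset.mpr (hsub A (List.mem_toFinset.mp hA))
  have h2 := Finset.card_le_card h1
  rw [Finset.card_powerset] at h2
  rwa [List.toFinset_card_of_nodup hnd] at h2

lemma toFinset_sum_le (l : List String) (f : String → Nat) :
    ∑ w ∈ l.toFinset, f w ≤ (l.map f).sum := by
  induction l with
  | nil => simp
  | cons x xs ih =>
    rw [List.toFinset_cons, List.map_cons, List.sum_cons]
    by_cases hx : x ∈ xs.toFinset
    · rw [Finset.insert_eq_self.mpr hx]; exact ih.trans (Nat.le_add_left _ _)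
    · rw [Finset.sum_insert hx]; exact Nat.add_le_add_left ih _

lemma ofList_toFinset (l : List String) : (PySem.Set.ofList l).toFinset = l.toFinset := by
  ext z; simp [List.mem_toFinset, PySem.Set.mem_ofList]

lemma card_UF_le (codigo : List String) :
    (UF (PySem.Set.ofList codigo).toFinset).card ≤ pvSumLen codigo := by
  rw [ofList_toFinset]
  calc (UF codigo.toFinset).card
      ≤ ∑ w ∈ codigo.toFinset, (sufF w).card := Finset.card_biUnion_le
    _ ≤ ∑ w ∈ codigo.toFinset, (w.toList.length + 1) :=
        Finset.sum_le_sum (fun w _ => card_sufF_le w)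
    _ ≤ pvSumLen codigo := toFinset_sum_le codigo _

-- ---- main loop lemmas ----
lemma equal_iff_toFinset (a b : PySem.Set String) :
    PySem.Set.equal a b = true ↔ a.toFinset = b.toFinset := by
  rw [PySem.Set.equal_iff, Finset.ext_iff]
  simp [List.mem_toFinset]

lemma loopA_correct (S0 : PySem.Set String) :
    ∀ (fuel : Nat) (hist : List (PySem.Set String)) (Si : PySem.Set String),
    S0 ∈ hist →
    (∀ t ∈ hist, (∃ t' ∈ hist.tail, stepF S0.toFinset t.toFinset = t'.toFinset) ∨
        t.toFinset = Si.toFinset) →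
    (∀ t ∈ hist.tail, t.toFinset ∩ S0.toFinset = ∅) →
    (∀ t ∈ hist.tail, t.toFinset ⊆ RN S0.toFinset) →
    (Si.toFinset ⊆ RN S0.toFinset ∨ Si.toFinset = S0.toFinset) →
    (∀ t ∈ hist, t.toFinset ⊆ UF S0.toFinset) →
    (hist.map List.toFinset).Nodup →
    2 ^ (UF S0.toFinset).card + 3 ≤ fuel + hist.length →
    (loopA S0 fuel hist Si = true ↔ RN S0.toFinset ∩ S0.toFinset = ∅) := by
  intro fuel
  induction fuel with
  | zero =>
    intro hist Si hmem hchain hnohit hsubR hSi hUF hdist hfuel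
    exfalso
    have hsub : ∀ A ∈ hist.map List.toFinset, A ⊆ UF S0.toFinset := by
      intro A hA
      rw [List.mem_map] at hA
      obtain ⟨t, ht, rfl⟩ := hA
      exact hUF t ht
    have hlen := nodup_length_le_pow hdist hsub
    rw [List.length_map] at hlen
    omega
  | succ fuel ih =>
    intro hist Si hmem hchain hnohit hsubR hSi hUF hdist hfuel
    rw [loopA]
    have hSnf : (rndA S0 Si).toFinset = stepF S0.toFinset Si.toFinset := rndA_toFinset _ _
    have hSnRN : (rndA S0 Si).toFinset ⊆ RN S0.toFinset := by
      rcases hSi with h | h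
      · rw [hSnf]
        exact (stepF_mono h).trans (RN_closed _)
      · rw [hSnf, h]
        exact chainR_zero_subset_RN _
    by_cases hb1 : PySem.Set.equal (PySem.Set.inter S0 (rndA S0 Si)) PySem.Set.empty = false
    · rw [if_pos hb1]
      simp only [Bool.false_eq_true, false_iff]
      intro hemp
      have hne : ¬ PySem.Set.equal (PySem.Set.inter S0 (rndA S0 Si)) PySem.Set.empty = true := by
        rw [hb1]
        simp
      rw [PySem.Set.equal_iff] at hne
      push Not at hne
      obtain ⟨z, hz⟩ := hne
      have hzi : z ∈ PySem.Set.inter S0 (rndA S0 Si) := by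
        rcases hz with ⟨h1, _⟩ | ⟨_, h2⟩
        · exact h1
        · exact absurd h2 (List.not_mem_nil)
      rw [PySem.Set.mem_inter] at hzi
      have hzRN : z ∈ RN S0.toFinset := hSnRN (List.mem_toFinset.mpr hzi.2)
      have : z ∈ RN S0.toFinset ∩ S0.toFinset :=
        Finset.mem_inter.mpr ⟨hzRN, List.mem_toFinset.mpr hzi.1⟩
      rw [hemp] at this
      exact Finset.notMem_empty z this
    · rw [if_neg hb1]
      have hb1' : PySem.Set.equal (PySem.Set.inter S0 (rndA S0 Si)) PySem.Set.empty = true :=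
        eq_true_of_ne_false hb1
      rw [PySem.Set.equal_iff] at hb1'
      have hSnCf : (rndA S0 Si).toFinset ∩ S0.toFinset = ∅ := by
        apply Finset.eq_empty_iff_forall_notMem.mpr
        intro z hz
        rw [Finset.mem_inter, List.mem_toFinset, List.mem_toFinset] at hz
        exact List.not_mem_nil ((hb1' z).mp ((PySem.Set.mem_inter _ _ _).mpr ⟨hz.2, hz.1⟩))
      by_cases hb2 : (PySem.Set.equal (rndA S0 Si) PySem.Set.empty ||
          hist.any fun t => PySem.Set.equal (rndA S0 Si) t) = true
      · rw [if_pos hb2]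
        simp only [true_iff]
        -- the union of all dangling-suffix sets seen so far is step-closed, so RN is inside it
        have hEstep : ∀ t ∈ hist, ∀ z ∈ stepF S0.toFinset t.toFinset,
            z ∈ (hist.tail.map List.toFinset).foldr (· ∪ ·) (rndA S0 Si).toFinset := by
          intro t ht z hz
          rcases hchain t ht with ⟨t', ht', heq⟩ | heq
          · rw [heq] at hz
            exact mem_foldr_union.mpr (Or.inr ⟨t'.toFinset, List.mem_map_of_mem ht', hz⟩)
          · rw [heq, ← hSnf] at hz
            exact mem_foldr_union.mpr (Or.inl hz)
        have hclosed : stepF S0.toFinset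
              ((hist.tail.map List.toFinset).foldr (· ∪ ·) (rndA S0 Si).toFinset) ⊆
            (hist.tail.map List.toFinset).foldr (· ∪ ·) (rndA S0 Si).toFinset := by
          intro z hz
          obtain ⟨y, hy, hzy⟩ := mem_stepF_single.mp hz
          have hy' := mem_foldr_union.mp hy
          have hmono : ∀ T, y ∈ T → z ∈ stepF S0.toFinset T :=
            fun T hT => stepF_mono (Finset.singleton_subset_iff.mpr hT) hzy
          rcases hy' with hySn | ⟨A, hA, hyA⟩
          · rcases Bool.or_eq_true_iff.mp hb2 with hem | hany
            · rw [equal_iff_toFinset] at hem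
              rw [hem] at hySn
              simp at hySn
            · obtain ⟨t, ht, heq⟩ := List.any_eq_true.mp hany
              rw [equal_iff_toFinset] at heq
              rw [heq] at hySn
              exact hEstep t ht z (hmono _ hySn)
          · rw [List.mem_map] at hA
            obtain ⟨t', ht', rfl⟩ := hA
            exact hEstep t' (List.mem_of_mem_tail ht') z (hmono _ hyA)
        have hRNsub : RN S0.toFinset ⊆
            (hist.tail.map List.toFinset).foldr (· ∪ ·) (rndA S0 Si).toFinset :=
          chainR_subset_closed hclosed (hEstep S0 hmem) _
        apply Finset.eq_empty_iff_forall_notMem.mpr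
        intro z hz
        rw [Finset.mem_inter] at hz
        rcases mem_foldr_union.mp (hRNsub hz.1) with h | ⟨A, hA, hzA⟩
        · have : z ∈ (rndA S0 Si).toFinset ∩ S0.toFinset := Finset.mem_inter.mpr ⟨h, hz.2⟩
          rw [hSnCf] at this
          exact Finset.notMem_empty z this
        · rw [List.mem_map] at hA
          obtain ⟨t, ht, rfl⟩ := hA
          have : z ∈ t.toFinset ∩ S0.toFinset := Finset.mem_inter.mpr ⟨hzA, hz.2⟩
          rw [hnohit t ht] at this
          exact Finset.notMem_empty z this
      · rw [if_neg hb2]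
        have hb2' : PySem.Set.equal (rndA S0 Si) PySem.Set.empty = false ∧
            (hist.any fun t => PySem.Set.equal (rndA S0 Si) t) = false :=
          Bool.or_eq_false_iff.mp (eq_false_of_ne_true hb2)
        have hhne : hist ≠ [] := by
          intro h
          rw [h] at hmem
          exact List.not_mem_nil hmem
        have htail : (hist ++ [rndA S0 Si]).tail = hist.tail ++ [rndA S0 Si] :=
          List.tail_append_of_ne_nil hhne
        have hSnmemtail : rndA S0 Si ∈ (hist ++ [rndA S0 Si]).tail := by
          rw [htail]
          exact List.mem_append.mpr (Or.inr (List.mem_singleton.mpr rfl))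
        apply ih (hist ++ [rndA S0 Si]) (rndA S0 Si)
        · exact List.mem_append.mpr (Or.inl hmem)
        · intro t ht
          rcases List.mem_append.mp ht with h | h
          · rcases hchain t h with ⟨t', ht', heq⟩ | heq
            · exact Or.inl ⟨t', by rw [htail]; exact List.mem_append.mpr (Or.inl ht'), heq⟩
            · exact Or.inl ⟨rndA S0 Si, hSnmemtail, by rw [heq, hSnf]⟩
          · rw [List.mem_singleton.mp h]
            exact Or.inr rfl
        · intro t ht
          rw [htail] at ht
          rcases List.mem_append.mp ht with h | h
          · exact hnohit t h
          · rw [List.mem_singleton.mp h]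
            exact hSnCf
        · intro t ht
          rw [htail] at ht
          rcases List.mem_append.mp ht with h | h
          · exact hsubR t h
          · rw [List.mem_singleton.mp h]
            exact hSnRN
        · exact Or.inl hSnRN
        · intro t ht
          rcases List.mem_append.mp ht with h | h
          · exact hUF t h
          · rw [List.mem_singleton.mp h]
            exact hSnRN.trans (RN_subset_UF _)
        · rw [List.map_append]
          rw [List.nodup_append]
          refine ⟨hdist, List.nodup_singleton _, ?_⟩
          intro A hA B hB
          rw [List.mem_map] at hA
          obtain ⟨t, ht, ht2⟩ := hA
          subst ht2
          rw [List.map_cons, List.map_nil, List.mem_singleton] at hB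
          subst hB
          intro hA2'
          have : PySem.Set.equal (rndA S0 Si) t = true := by
            rw [equal_iff_toFinset, hA2']
          have hany : (hist.any fun t => PySem.Set.equal (rndA S0 Si) t) = true :=
            List.any_eq_true.mpr ⟨t, ht, this⟩
          rw [hb2'.2] at hany
          cases hany
        · rw [List.length_append]
          simp only [List.length_cons, List.length_nil]
          omega

lemma loopB_correct (C : PySem.Set String) :
    ∀ (fuel : Nat) (pending : List String) (seen : PySem.Set String),
    (∀ z ∈ pending, z ∈ RN C.toFinset) →
    (∀ z ∈ seen, z ∈ RN C.toFinset) →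
    (∀ z ∈ seen, z ∉ C.toFinset) →
    seen.Nodup →
    (∀ z ∈ chainR C.toFinset 0, z ∈ seen ∨ z ∈ pending) →
    (∀ s ∈ seen, ∀ z ∈ stepF C.toFinset {s}, z ∈ seen ∨ z ∈ pending) →
    pending.length + ((UF C.toFinset).card - seen.length) * (2 * C.length + 1) + 1 ≤ fuel →
    (loopB C fuel pending seen = true ↔ RN C.toFinset ∩ C.toFinset = ∅) := by
  intro fuel
  induction fuel with
  | zero => intro pending seen _ _ _ _ _ _ hfuel; omega
  | succ fuel ih =>
    intro pending seen hpend hseenR hseenC hseennd hcov0 hcovstep hfuel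
    rw [loopB]
    cases hlast : pending.getLast? with
    | none =>
      have hpe : pending = [] := List.getLast?_eq_none_iff.mp hlast
      subst hpe
      have hclosed : stepF C.toFinset seen.toFinset ⊆ seen.toFinset := by
        intro z hz
        obtain ⟨y, hy, hzy⟩ := mem_stepF_single.mp hz
        rcases hcovstep y (List.mem_toFinset.mp hy) z hzy with h | h
        · exact List.mem_toFinset.mpr h
        · exact absurd h (List.not_mem_nil)
      have h0 : chainR C.toFinset 0 ⊆ seen.toFinset := by
        intro z hz
        rcases hcov0 z hz with h | h
        · exact List.mem_toFinset.mpr h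
        · exact absurd h (List.not_mem_nil)
      have hsub : RN C.toFinset ⊆ seen.toFinset :=
        chainR_subset_closed hclosed h0 _
      simp only [true_iff]
      apply Finset.eq_empty_iff_forall_notMem.mpr
      intro z hz
      rw [Finset.mem_inter] at hz
      exact hseenC z (List.mem_toFinset.mp (hsub hz.1)) hz.2
    | some s =>
      dsimp only
      have hsmem : s ∈ pending := List.mem_of_getLast? hlast
      have hsRN : s ∈ RN C.toFinset := hpend s hsmem
      have hdecomp : pending.dropLast ++ [s] = pending := List.dropLast_append_getLast? s hlast
      have hsplit : ∀ z ∈ pending, z ∈ pending.dropLast ∨ z = s := by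
        intro z hz
        rw [← hdecomp, List.mem_append, List.mem_singleton] at hz
        exact hz
      have hlen : pending.length = pending.dropLast.length + 1 := by
        conv_lhs => rw [← hdecomp]
        simp
      by_cases hcs : PySem.Set.contains seen s = true
      · rw [if_pos hcs]
        have hsseen : s ∈ seen := (PySem.Set.contains_iff _ _).mp hcs
        apply ih
        · exact fun z hz => hpend z (List.mem_of_mem_dropLast hz)
        · exact hseenR
        · exact hseenC
        · exact hseennd
        · intro z hz
          rcases hcov0 z hz with h | h
          · exact Or.inl h
          · rcases hsplit z h with h' | h'
            · exact Or.inr h'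
            · exact Or.inl (h' ▸ hsseen)
        · intro t ht z hz
          rcases hcovstep t ht z hz with h | h
          · exact Or.inl h
          · rcases hsplit z h with h' | h'
            · exact Or.inr h'
            · exact Or.inl (h' ▸ hsseen)
        · omega
      · rw [if_neg hcs]
        by_cases hcc : PySem.Set.contains C s = true
        · rw [if_pos hcc]
          simp only [Bool.false_eq_true, false_iff]
          intro hemp
          have hsC : s ∈ C.toFinset := List.mem_toFinset.mpr ((PySem.Set.contains_iff _ _).mp hcc)
          have : s ∈ RN C.toFinset ∩ C.toFinset := Finset.mem_inter.mpr ⟨hsRN, hsC⟩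
          rw [hemp] at this
          exact Finset.notMem_empty s this
        · rw [if_neg hcc]
          have hsnC : s ∉ C := fun h => hcc ((PySem.Set.contains_iff C s).mpr h)
          have hsns : s ∉ seen := fun h => hcs ((PySem.Set.contains_iff seen s).mpr h)
          have hstepRN : ∀ z ∈ stepF C.toFinset {s}, z ∈ RN C.toFinset := by
            intro z hz
            apply RN_closed C.toFinset
            exact stepF_mono (by simp [Finset.singleton_subset_iff, hsRN]) hz
          apply ih
          · intro z hz
            rcases mem_pushes.mp hz with h | h
            · exact hpend z (List.mem_of_mem_dropLast h)
            · exact hstepRN z h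
          · intro z hz
            rcases (PySem.Set.mem_add seen s z).mp hz with h | h
            · exact hseenR z h
            · exact h ▸ hsRN
          · intro z hz
            rcases (PySem.Set.mem_add seen s z).mp hz with h | h
            · exact hseenC z h
            · subst h; exact fun hc => hsnC (List.mem_toFinset.mp hc)
          · exact PySem.Set.nodup_add _ _ hseennd
          · intro z hz
            rcases hcov0 z hz with h | h
            · exact Or.inl ((PySem.Set.mem_add seen s z).mpr (Or.inl h))
            · rcases hsplit z h with h' | h'
              · exact Or.inr (mem_pushes.mpr (Or.inl h'))
              · exact Or.inl ((PySem.Set.mem_add seen s z).mpr (Or.inr h'))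
          · intro t ht z hz
            rcases (PySem.Set.mem_add seen s t).mp ht with h | h
            · rcases hcovstep t h z hz with h' | h'
              · exact Or.inl ((PySem.Set.mem_add seen s z).mpr (Or.inl h'))
              · rcases hsplit z h' with h'' | h''
                · exact Or.inr (mem_pushes.mpr (Or.inl h''))
                · exact Or.inl ((PySem.Set.mem_add seen s z).mpr (Or.inr h''))
            · subst h
              exact Or.inr (mem_pushes.mpr (Or.inr hz))
          · -- fuel bound
            have hlenadd : (PySem.Set.add seen s).length = seen.length + 1 := by
              rw [PySem.Set.add_eq_ite, if_neg hsns, List.length_append, List.length_cons,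
                List.length_nil]
            have hlenpush := length_pushes C s pending.dropLast
            have hseencard : seen.length < (UF C.toFinset).card := by
              have h1 : seen.toFinset.card = seen.length := List.toFinset_card_of_nodup hseennd
              have h2 : insert s seen.toFinset ⊆ UF C.toFinset := by
                intro z hz
                rcases Finset.mem_insert.mp hz with h | h
                · exact h ▸ RN_subset_UF C.toFinset hsRN
                · exact RN_subset_UF C.toFinset (hseenR z (List.mem_toFinset.mp h))
              have h3 : s ∉ seen.toFinset := fun h => hsns (List.mem_toFinset.mp h)
              have h4 := Finset.card_le_card h2
              rw [Finset.card_insert_of_notMem h3, h1] at h4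
              omega
            have key : ∀ a b : Nat, 0 < a → a * b = (a - 1) * b + b := by
              intro a b ha
              cases a with
              | zero => omega
              | succ n => simp [Nat.succ_mul]
            have hexp := key ((UF C.toFinset).card - seen.length) (2 * C.length + 1)
              (by omega)
            have hexp2 : (UF C.toFinset).card - (PySem.Set.add seen s).length =
                (UF C.toFinset).card - seen.length - 1 := by
              rw [hlenadd]
              omega
            rw [hexp2]
            rw [hexp] at hfuel
            omega

-- ===== VERDICT (by name: the statement is the Claim_ definition above) =====
lemma bool_eq_of_iff {a b : Bool} (h : (a = true) ↔ (b = true)) : a = b := by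
  cases a <;> cases b <;> simp_all

theorem univoco_spec : Claim_equal_univoco := by
  unfold Claim_equal_univoco
  intro codigo _
  unfold Spec_univoco
  simp only [univoco, univoco_alt, PySem.List.dedup_eq_ofList]
  apply bool_eq_of_iff
  have hcard := card_UF_le codigo
  have h1 := loopA_correct (PySem.Set.ofList codigo) (2 ^ pvSumLen codigo + 2)
    [PySem.Set.ofList codigo] (PySem.Set.ofList codigo)
    (List.mem_singleton.mpr rfl)
    (by intro t ht; rw [List.mem_singleton.mp ht]; exact Or.inr rfl)
    (by intro t ht; exact absurd ht (List.not_mem_nil))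
    (by intro t ht; exact absurd ht (List.not_mem_nil))
    (Or.inr rfl)
    (by
      intro t ht z hz
      rw [List.mem_singleton.mp ht] at hz
      exact mem_UF_self hz)
    (by simp)
    (by
      have hpow : 2 ^ (UF (PySem.Set.ofList codigo).toFinset).card ≤ 2 ^ pvSumLen codigo :=
        Nat.pow_le_pow_right (by omega) hcard
      simp only [List.length_cons, List.length_nil]
      omega)
  have h2 := loopB_correct (PySem.Set.ofList codigo)
    ((initPend (PySem.Set.ofList codigo)).length +
      (pvSumLen codigo + 1) * (2 * (PySem.Set.ofList codigo).length + 1) + 1)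
    (initPend (PySem.Set.ofList codigo)) PySem.Set.empty
    (by
      intro z hz
      exact chainR_zero_subset_RN _ (mem_initPend.mp hz))
    (by intro z hz; exact absurd hz (List.not_mem_nil))
    (by intro z hz; exact absurd hz (List.not_mem_nil))
    List.nodup_nil
    (by intro z hz; exact Or.inr (mem_initPend.mpr hz))
    (by intro t ht; exact absurd ht (List.not_mem_nil))
    (by
      have hmul : ((UF (PySem.Set.ofList codigo).toFinset).card - 0) *
            (2 * (PySem.Set.ofList codigo).length + 1) ≤
          (pvSumLen codigo + 1) * (2 * (PySem.Set.ofList codigo).length + 1) :=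
        Nat.mul_le_mul_right _ (by omega)
      simp only [PySem.Set.empty, List.length_nil]
      omega)
  exact h1.trans h2.symm
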